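-- pv_equiv track=rewrite | github.com/leonardtschora/EPFDAML | work/models/LAGO_wrapper.py | _remove_country
-- ===== SOURCE A (Python) =====
-- def _remove_country(path):
--     s = ""
--     for ss in path.split("EPF_")[-1].split("_")[1:]: s += ss + "_"
--     s = s[:-1]
--
--     res = ""
--     for ss in path.split("EPF_")[:-1]: res += ss + "EPF_"
--     res = res[:-4]
--
--     res += s
--     return res
-- ===== SOURCE B (Python) =====
-- def _remove_country(path):
--     idx = path.rfind("EPF_")
--     if idx == -1:
--         prefix, suffix = "", path
--     else:
--         prefix, suffix = path[:idx], path[idx + 4:]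
--     return prefix + "_".join(suffix.split("_")[1:])
-- ===== Notes on version B (the rewrite author's own statement) =====
-- stated objective: simpler
-- what changed: Replaces A's two split-everything-then-rebuild-by-accumulating-loops-and-strip-trailing-separator passes with a single rfind lookup of the marker's last occurrence, two slices and one join on the suffix.
import Mathlib
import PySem

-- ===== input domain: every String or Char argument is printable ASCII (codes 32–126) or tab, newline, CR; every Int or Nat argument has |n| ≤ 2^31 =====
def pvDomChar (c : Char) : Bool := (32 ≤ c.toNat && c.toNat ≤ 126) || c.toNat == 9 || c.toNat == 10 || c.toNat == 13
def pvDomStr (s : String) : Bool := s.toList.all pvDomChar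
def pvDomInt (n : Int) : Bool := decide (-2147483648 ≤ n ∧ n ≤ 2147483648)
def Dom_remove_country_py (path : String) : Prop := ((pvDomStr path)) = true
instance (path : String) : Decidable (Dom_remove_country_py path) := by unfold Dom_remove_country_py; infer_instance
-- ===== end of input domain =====

-- B replaces A's split-everything-then-rebuild-by-loop-and-strip passes with one rfind boundary lookup of the marker, two slices and a join (same return value).

-- ===== PORT A =====
def remove_country_py (path : String) : String :=
  let parts := PySem.Chars.splitOn path.toList "EPF_".toList
  -- s = ""; for ss in path.split("EPF_")[-1].split("_")[1:]: s += ss + "_"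
  let lastPart := (PySem.List.pyGet? parts (-1)).getD []   -- parts[-1]; str.split never returns an empty list
  let s := (PySem.List.slice (PySem.Chars.splitOn lastPart "_".toList) (some 1) none).foldl
             (fun r ss => r ++ ss ++ "_".toList) []
  let s' := PySem.List.slice s none (some (-1))            -- s = s[:-1]
  -- res = ""; for ss in path.split("EPF_")[:-1]: res += ss + "EPF_"
  let res := (PySem.List.slice parts none (some (-1))).foldl
             (fun r ss => r ++ ss ++ "EPF_".toList) []
  let res' := PySem.List.slice res none (some (-4))        -- res = res[:-4]
  String.ofList (res' ++ s')                               -- res += s; return res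

-- ===== PORT B =====
def remove_country_py_alt (path : String) : String :=
  let idx := PySem.Chars.rfind path.toList "EPF_".toList
  let ps := if idx = -1 then (([] : List Char), path.toList)
            else (PySem.List.slice path.toList none (some idx),
                  PySem.List.slice path.toList (some (idx + 4)) none)
  String.ofList (ps.1 ++ PySem.Chars.join "_".toList
    (PySem.List.slice (PySem.Chars.splitOn ps.2 "_".toList) (some 1) none))

-- ===== PRECONDITION & SPEC =====
def Spec_remove_country_py (path : String) (out : String) : Prop := out = remove_country_py_alt path
instance (path : String) (out : String) : Decidable (Spec_remove_country_py path out) := by unfold Spec_remove_country_py; infer_instance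

-- ===== CLAIM (what is proved, stated in full; the proofs are below) =====
def Claim_equal_remove_country_py : Prop := ∀ (path : String), Dom_remove_country_py path → Spec_remove_country_py path (remove_country_py path)

-- ===== LEMMAS AND PROOFS =====

theorem pv_intercalate_cc (sep x y : List Char) (ys : List (List Char)) :
    sep.intercalate (x :: y :: ys) = x ++ sep ++ sep.intercalate (y :: ys) := by
  simp [List.intercalate, List.intersperse]

theorem pv_foldl_acc (sep : List Char) (l : List (List Char)) (a : List Char) :
    l.foldl (fun r ss => r ++ ss ++ sep) a = a ++ l.foldl (fun r ss => r ++ ss ++ sep) [] := by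
  induction l generalizing a with
  | nil => simp
  | cons x xs ih =>
    simp only [List.foldl_cons, List.nil_append]
    rw [ih (a ++ x ++ sep), ih (x ++ sep)]; simp

theorem pv_foldl_join (sep : List Char) (l : List (List Char)) :
    l.foldl (fun r ss => r ++ ss ++ sep) [] =
      if l = [] then [] else sep.intercalate l ++ sep := by
  induction l with
  | nil => simp
  | cons x xs ih =>
    simp only [List.foldl_cons, List.nil_append]
    rw [pv_foldl_acc, ih]
    cases xs with
    | nil => simp [List.intercalate]
    | cons y ys => simp [pv_intercalate_cc]

theorem pv_intercalate_concat (sep lp : List Char) (dl : List (List Char)) (h : dl ≠ []) :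
    sep.intercalate (dl ++ [lp]) = sep.intercalate dl ++ sep ++ lp := by
  induction dl with
  | nil => simp at h
  | cons x xs ih =>
    cases xs with
    | nil => simp [List.intercalate, List.intersperse]
    | cons y ys =>
      simp only [List.cons_append, pv_intercalate_cc]
      have := ih (by simp)
      simp only [List.cons_append] at this
      rw [this]; simp

-- splitOn.go produces a non-empty list of parts whose sep-joined value is the input, sep-free last part
theorem pv_go_spec (sep : List Char) (hsep : sep ≠ []) :
    ∀ fuel (l cur : List Char) (acc : List (List Char)), l.length < fuel →
    (∀ j, j < cur.length → ¬ sep <+: (cur.reverse ++ l).drop j) →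
    ∃ dl lp, PySem.Chars.splitOn.go sep fuel l cur acc = acc.reverse ++ dl ++ [lp] ∧
      sep.intercalate (dl ++ [lp]) = cur.reverse ++ l ∧
      (∀ j, ¬ sep <+: lp.drop j) := by
  intro fuel
  induction fuel with
  | zero =>
    intro l cur acc h
    exact absurd h (Nat.not_lt_zero _)
  | succ n ih =>
    intro l cur acc hlen hcur
    cases l with
    | nil =>
      refine ⟨[], cur.reverse, ?_, by simp [List.intercalate], ?_⟩
      · simp [PySem.Chars.splitOn.go]
      · intro j
        by_cases hj : j < cur.length
        · have := hcur j hj; simpa using this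
        · rw [List.drop_eq_nil_of_le (by simpa using Nat.le_of_not_lt hj)]
          simpa [List.prefix_nil] using hsep
    | cons c rest =>
      by_cases hpre : sep.isPrefixOf (c :: rest)
      · rw [show PySem.Chars.splitOn.go sep (n+1) (c :: rest) cur acc
              = PySem.Chars.splitOn.go sep n (List.drop sep.length (c :: rest)) [] (cur.reverse :: acc) by
            simp [PySem.Chars.splitOn.go, hpre]]
        have hp : sep <+: (c :: rest) := List.isPrefixOf_iff_prefix.mp hpre
        obtain ⟨t, ht⟩ := hp
        have hdrop : List.drop sep.length (c :: rest) = t := by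
          rw [← ht]; simp
        have hlen' : (List.drop sep.length (c :: rest)).length < n := by
          have : 0 < sep.length := List.length_pos_iff.mpr hsep
          simp only [List.length_drop, List.length_cons]
          simp only [List.length_cons] at hlen
          omega
        obtain ⟨dl, lp, hgo, hint, hlast⟩ := ih (List.drop sep.length (c :: rest)) [] (cur.reverse :: acc) hlen' (by simp)
        refine ⟨cur.reverse :: dl, lp, ?_, ?_, hlast⟩
        · rw [hgo]; simp
        · cases dl with
          | nil =>
            have hlp : lp = t := by
              have h2 := hint
              simp [List.intercalate] at h2
              rw [hdrop] at h2; exact h2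
            subst hlp
            rw [← ht]
            simp [List.intercalate, List.intersperse]
          | cons d ds =>
            rw [show ((cur.reverse :: d :: ds) ++ [lp]) = cur.reverse :: (d :: (ds ++ [lp])) by simp,
                show sep.intercalate (cur.reverse :: d :: (ds ++ [lp])) = cur.reverse ++ sep ++ sep.intercalate (d :: (ds ++ [lp])) by
                  simp [List.intercalate, List.intersperse]]
            have : sep.intercalate ((d :: ds) ++ [lp]) = List.drop sep.length (c :: rest) := by simpa using hint
            simp only [List.cons_append] at this
            rw [this, hdrop, ← ht]; simp
      · rw [show PySem.Chars.splitOn.go sep (n+1) (c :: rest) cur acc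
              = PySem.Chars.splitOn.go sep n rest (c :: cur) acc by
            simp [PySem.Chars.splitOn.go, hpre]]
        have hcur' : ∀ j, j < (c :: cur).length → ¬ sep <+: ((c :: cur).reverse ++ rest).drop j := by
          intro j hj
          have hrw : (c :: cur).reverse ++ rest = cur.reverse ++ (c :: rest) := by simp
          rw [hrw]
          by_cases hjc : j < cur.length
          · exact hcur j hjc
          · have hj' : j = cur.length := by simp at hj; omega
            rw [hj']
            rw [show cur.length = cur.reverse.length by simp, List.drop_left]
            exact fun hc => hpre (List.isPrefixOf_iff_prefix.mpr hc)
        obtain ⟨dl, lp, hgo, hint, hlast⟩ := ih rest (c :: cur) acc (by simp at hlen ⊢; omega) hcur'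
        refine ⟨dl, lp, hgo, ?_, hlast⟩
        rw [hint]; simp

-- rfind.go returns the highest occurrence index ≤ k, or -1
theorem pv_rgo_spec (s sub : List Char) :
    ∀ k : ℕ,
      (PySem.Chars.rfind.go s sub k = -1 ∧ ∀ j, j ≤ k → ¬ sub <+: s.drop j) ∨
      (∃ i : ℕ, i ≤ k ∧ PySem.Chars.rfind.go s sub k = (i : ℤ) ∧ sub <+: s.drop i ∧
        ∀ j, i < j → j ≤ k → ¬ sub <+: s.drop j) := by
  intro k
  induction k with
  | zero =>
    by_cases h : sub.isPrefixOf s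
    · right
      exact ⟨0, le_refl _, by simp [PySem.Chars.rfind.go, h],
        by simpa using List.isPrefixOf_iff_prefix.mp h, by omega⟩
    · left
      refine ⟨by simp [PySem.Chars.rfind.go, h], ?_⟩
      intro j hj
      interval_cases j
      simpa using fun hc => h (List.isPrefixOf_iff_prefix.mpr hc)
  | succ n ih =>
    by_cases h : sub.isPrefixOf (List.drop (n + 1) s)
    · right
      refine ⟨n + 1, le_refl _, by simp [PySem.Chars.rfind.go, h], List.isPrefixOf_iff_prefix.mp h, by omega⟩
    · have hgo : PySem.Chars.rfind.go s sub (n + 1) = PySem.Chars.rfind.go s sub n := by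
        simp [PySem.Chars.rfind.go, h]
      have hn1 : ¬ sub <+: s.drop (n + 1) := fun hc => h (List.isPrefixOf_iff_prefix.mpr hc)
      rcases ih with ⟨he, hall⟩ | ⟨i, hik, he, hocc, hmax⟩
      · left
        refine ⟨by rw [hgo, he], ?_⟩
        intro j hj
        rcases Nat.lt_or_ge j (n + 1) with hj' | hj'
        · exact hall j (by omega)
        · have : j = n + 1 := by omega
          rw [this]; exact hn1
      · right
        refine ⟨i, by omega, by rw [hgo, he], hocc, ?_⟩
        intro j hij hj
        rcases Nat.lt_or_ge j (n + 1) with hj' | hj'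
        · exact hmax j hij (by omega)
        · have : j = n + 1 := by omega
          rw [this]; exact hn1

theorem pv_pyGet_last {α : Type} (dl : List α) (lp : α) :
    PySem.List.pyGet? (dl ++ [lp]) (-1) = some lp := by
  simp [PySem.List.pyGet?, PySem.List.pyIdx?]

-- no occurrence of a border-free sep strictly after the start of its displayed occurrence
theorem pv_last_occ (sep : List Char)
    (hb : ∀ d : ℕ, d < sep.length → 0 < d → ¬ (List.drop d sep <+: sep))
    (pre t : List Char) (ht : ∀ j, ¬ sep <+: t.drop j) :
    ∀ j, pre.length < j → ¬ sep <+: (pre ++ sep ++ t).drop j := by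
  intro j hj hc
  rcases Nat.lt_or_ge j (pre.length + sep.length) with hsmall | hbig
  · have hdrop : (pre ++ sep ++ t).drop j = sep.drop (j - pre.length) ++ t := by
      rw [List.append_assoc, List.drop_append, List.drop_eq_nil_of_le (by omega), List.nil_append,
          List.drop_append, show j - pre.length - sep.length = 0 from by omega, List.drop_zero]
    rw [hdrop] at hc
    have h1 : sep.drop (j - pre.length) <+: sep.drop (j - pre.length) ++ t := List.prefix_append _ _
    have h2 : sep.drop (j - pre.length) <+: sep :=
      List.prefix_of_prefix_length_le h1 hc (by simp)
    exact hb (j - pre.length) (by omega) (by omega) h2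
  · have hdrop : (pre ++ sep ++ t).drop j = t.drop (j - pre.length - sep.length) := by
      rw [List.append_assoc, List.drop_append, List.drop_eq_nil_of_le (by omega), List.nil_append,
          List.drop_append, List.drop_eq_nil_of_le (as := sep) (by omega), List.nil_append]
    rw [hdrop] at hc
    exact ht _ hc

-- the common suffix computation: A's loop-then-strip equals B's join, on the '_'-split tail
theorem pv_suffix (lp : List Char) :
    PySem.List.slice ((PySem.List.slice (PySem.Chars.splitOn lp "_".toList) (some 1) none).foldl
        (fun r ss => r ++ ss ++ "_".toList) []) none (some (-1))
      = PySem.Chars.join "_".toList (PySem.List.slice (PySem.Chars.splitOn lp "_".toList) (some 1) none) := by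
  rw [pv_foldl_join]
  by_cases h : PySem.List.slice (PySem.Chars.splitOn lp "_".toList) (some 1) none = []
  · rw [if_pos h, h]
    simp [PySem.Chars.join, List.intercalate, PySem.List.slice_to_neg_one]
  · rw [if_neg h, PySem.List.slice_to_neg_one,
        show ("_".toList) = ['_'] from by decide, List.dropLast_concat]
    simp [PySem.Chars.join]

-- ===== VERDICT (by name: the statement is the Claim_ definition above) =====
theorem remove_country_py_spec : Claim_equal_remove_country_py := by
  intro path _
  unfold Spec_remove_country_py
  simp only [remove_country_py, remove_country_py_alt]
  set cs := path.toList with hcs0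
  have hsep : ("EPF_".toList : List Char) ≠ [] := by decide
  have hb : ∀ d : ℕ, d < ("EPF_".toList : List Char).length → 0 < d →
      ¬ (List.drop d "EPF_".toList <+: "EPF_".toList) := by decide
  obtain ⟨dl, lp, hsplit, hint, hlast⟩ :
      ∃ dl lp, PySem.Chars.splitOn cs "EPF_".toList = dl ++ [lp] ∧
        List.intercalate "EPF_".toList (dl ++ [lp]) = cs ∧
        (∀ j, ¬ "EPF_".toList <+: lp.drop j) := by
    obtain ⟨dl, lp, hgo, hint, hlast⟩ :=
      pv_go_spec "EPF_".toList hsep (cs.length + 1) cs [] [] (by omega) (by simp)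
    exact ⟨dl, lp, by simpa [PySem.Chars.splitOn] using hgo, by simpa using hint, hlast⟩
  rw [hsplit, pv_pyGet_last, Option.getD_some,
      PySem.List.slice_to_neg_one, List.dropLast_concat, pv_foldl_join]
  cases dl with
  | nil =>
    have hlp : lp = cs := by simpa [List.intercalate] using hint
    subst hlp
    have hrfind : PySem.Chars.rfind cs "EPF_".toList = -1 := by
      rcases pv_rgo_spec cs "EPF_".toList cs.length with ⟨he, _⟩ | ⟨i, _, _, hocc, _⟩
      · simpa [PySem.Chars.rfind] using he
      · exact absurd hocc (hlast i)
    rw [hrfind, if_pos rfl, if_pos rfl]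
    rw [show PySem.List.slice ([] : List Char) none (some (-4)) = [] from by decide]
    rw [pv_suffix]
  | cons d ds =>
    have hne : (d :: ds : List (List Char)) ≠ [] := by simp
    have hcs : cs = List.intercalate "EPF_".toList (d :: ds) ++ "EPF_".toList ++ lp := by
      rw [← pv_intercalate_concat _ _ _ hne]; exact hint.symm
    set pre := List.intercalate "EPF_".toList (d :: ds) with hpre
    have hocc_pre : "EPF_".toList <+: cs.drop pre.length := by
      rw [hcs, List.append_assoc, List.drop_left]
      exact List.prefix_append _ _
    have hnone_after := pv_last_occ "EPF_".toList hb pre lp hlast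
    have hlen_pre : pre.length ≤ cs.length := by
      rw [hcs]; simp
    have hrfind : PySem.Chars.rfind cs "EPF_".toList = (pre.length : ℤ) := by
      rcases pv_rgo_spec cs "EPF_".toList cs.length with ⟨_, hall⟩ | ⟨i, hik, he, hocc, hmax⟩
      · exact absurd hocc_pre (hall pre.length hlen_pre)
      · have hi_le : i ≤ pre.length := by
          by_contra hlt
          exact hnone_after i (by omega) (by rw [← hcs]; exact hocc)
        have hi_ge : pre.length ≤ i := by
          by_contra hlt
          exact hmax pre.length (by omega) hlen_pre hocc_pre
        have : i = pre.length := le_antisymm hi_le hi_ge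
        rw [← this]
        simpa [PySem.Chars.rfind] using he
    have hneg : ((pre.length : ℤ) ≠ -1) := by omega
    rw [hrfind, if_neg hneg, if_neg hne]
    have htake : PySem.List.slice cs none (some ((pre.length : ℕ) : ℤ)) = pre := by
      rw [PySem.List.slice_to_natCast, hcs, List.append_assoc, List.take_left]
    have hdrop : PySem.List.slice cs (some ((pre.length : ℤ) + 4)) none = lp := by
      rw [show ((pre.length : ℤ) + 4) = (((pre.length + 4 : ℕ)) : ℤ) from by push_cast; ring,
          PySem.List.slice_from_natCast, hcs,
          show pre.length + 4 = (pre ++ "EPF_".toList).length from by simp,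
          List.drop_left]
    rw [htake, hdrop, pv_suffix]
    rw [pv_intercalate_concat _ _ _ hne] at hint
    rw [show List.intercalate "EPF_".toList (d :: ds) ++ "EPF_".toList = pre ++ "EPF_".toList from rfl]
    rw [PySem.List.slice_to_neg_ofNat _ 4 (by omega),
        show (pre ++ "EPF_".toList).length - 4 = pre.length from by simp,
        List.take_left]
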